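-- pv_equiv track=rewrite | github.com/LautaroCenteno/int-prog | segundo bimestre/guia_integradora.py | subsecuencia_mas_larga
-- ===== SOURCE A (Python) =====
-- def subsecuencia_mas_larga(tipos_pacientes_atendidos: list[str]) -> int:
--     racha_actual: int = 0
--     pos_racha_actual: int = -1
--     tipo_racha: str = ""
--     racha_maxima: int = 0
--     pos_racha_maxima: int = 0
--     for i in range(len(tipos_pacientes_atendidos)):
--         if tipos_pacientes_atendidos[i] == "perro" or tipos_pacientes_atendidos[i] == "gato":
--             if tipos_pacientes_atendidos[i] != tipo_racha:
--                 if racha_actual > racha_maxima: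
--                     racha_maxima = racha_actual
--                     pos_racha_maxima = pos_racha_actual
--                 racha_actual = 1
--                 pos_racha_actual  = i
--                 tipo_racha = tipos_pacientes_atendidos[i]
--             elif tipos_pacientes_atendidos[i] == tipo_racha:
--                 racha_actual += 1
--         else:
--             if racha_actual > racha_maxima:
--                     racha_maxima = racha_actual
--                     pos_racha_maxima = pos_racha_actual
--             racha_actual = 0
--             pos_racha_actual = -1
--             tipo_racha = ""
--     if racha_actual > racha_maxima:
--                     racha_maxima = racha_actual
--                     pos_racha_maxima = pos_racha_actual
--     return pos_racha_maxima
-- ===== SOURCE B (Python) =====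
-- def subsecuencia_mas_larga(tipos_pacientes_atendidos: list[str]) -> int:
--     # Run-skipping two-pointer scan: consume each maximal run of an equal
--     # valid token in one inner scan, keeping the first run of maximal length.
--     n = len(tipos_pacientes_atendidos)
--     best_len = 0
--     best_pos = 0
--     i = 0
--     while i < n:
--         v = tipos_pacientes_atendidos[i]
--         if v == "perro" or v == "gato":
--             j = i + 1
--             while j < n and tipos_pacientes_atendidos[j] == v:
--                 j += 1
--             if j - i > best_len:
--                 best_len = j - i
--                 best_pos = i
--             i = j
--         else:
--             i += 1
--     return best_pos
-- ===== Notes on version B (the rewrite author's own statement) =====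
-- stated objective: alternative
-- what changed: Replaces A's single-pass five-variable streak state machine (current streak length/start/type plus deferred flush comparisons) by a two-pointer run-skipping scan that consumes each maximal run of an equal valid token with an inner scan and compares its length immediately, keeping the first maximum.
import Mathlib
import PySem

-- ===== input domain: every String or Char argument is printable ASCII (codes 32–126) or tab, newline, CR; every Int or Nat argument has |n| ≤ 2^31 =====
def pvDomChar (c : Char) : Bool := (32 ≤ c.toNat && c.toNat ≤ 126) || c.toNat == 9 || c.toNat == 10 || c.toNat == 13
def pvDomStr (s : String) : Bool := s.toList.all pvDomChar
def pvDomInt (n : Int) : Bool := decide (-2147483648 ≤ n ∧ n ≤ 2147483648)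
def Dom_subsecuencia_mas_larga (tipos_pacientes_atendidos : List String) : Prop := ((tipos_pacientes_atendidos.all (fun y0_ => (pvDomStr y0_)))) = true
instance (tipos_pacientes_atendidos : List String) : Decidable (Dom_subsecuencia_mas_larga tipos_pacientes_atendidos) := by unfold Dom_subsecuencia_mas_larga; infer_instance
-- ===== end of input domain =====

-- B replaces A's five-variable streak state machine with deferred flushes by a
-- two-pointer run-skipping scan that compares each maximal run immediately (alternative decomposition).

-- ===== PORT A =====
-- state: (racha_actual, pos_racha_actual, tipo_racha, racha_maxima, pos_racha_maxima)
def aStep (st : Int × Int × String × Int × Int) (ix : Int × String) :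
    Int × Int × String × Int × Int :=
  let (c, p, t, m, pm) := st
  let (i, x) := ix
  if x == "perro" || x == "gato" then
    if x != t then
      if c > m then (1, i, x, c, p) else (1, i, x, m, pm)
    else
      -- elif x == tipo_racha (always true here)
      (c + 1, p, t, m, pm)
  else
    if c > m then (0, -1, "", c, p) else (0, -1, "", m, pm)

def aFinal (st : Int × Int × String × Int × Int) : Int :=
  let (c, p, _, m, pm) := st
  if c > m then p else pm

def subsecuencia_mas_larga (tipos_pacientes_atendidos : List String) : Int :=
  aFinal ((PySem.List.enumerate tipos_pacientes_atendidos 0).foldl aStep (0, -1, "", 0, 0))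

-- ===== PORT B =====
def bLoop (l : List String) (i bestLen bestPos : Int) : Int :=
  match l with
  | [] => bestPos
  | a :: rest =>
    if a == "perro" || a == "gato" then
      let run := rest.takeWhile (fun x => x == a)
      let k : Int := (run.length : Int) + 1
      let rest' := rest.dropWhile (fun x => x == a)
      if k > bestLen then bLoop rest' (i + k) k i
      else bLoop rest' (i + k) bestLen bestPos
    else bLoop rest (i + 1) bestLen bestPos
termination_by l.length
decreasing_by
  · simpa using Nat.lt_succ_of_le (List.length_dropWhile_le _ _)
  · simpa using Nat.lt_succ_of_le (List.length_dropWhile_le _ _)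
  · simp

def subsecuencia_mas_larga_alt (tipos_pacientes_atendidos : List String) : Int :=
  bLoop tipos_pacientes_atendidos 0 0 0

-- ===== PRECONDITION & SPEC =====
def Spec_subsecuencia_mas_larga (tipos_pacientes_atendidos : List String) (out : Int) : Prop := out = subsecuencia_mas_larga_alt tipos_pacientes_atendidos
instance (tipos_pacientes_atendidos : List String) (out : Int) : Decidable (Spec_subsecuencia_mas_larga tipos_pacientes_atendidos out) := by unfold Spec_subsecuencia_mas_larga; infer_instance

-- ===== CLAIM (what is proved, stated in full; the proofs are below) =====
def Claim_equal_subsecuencia_mas_larga : Prop := ∀ (tipos_pacientes_atendidos : List String), Dom_subsecuencia_mas_larga tipos_pacientes_atendidos → Spec_subsecuencia_mas_larga tipos_pacientes_atendidos (subsecuencia_mas_larga tipos_pacientes_atendidos)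

-- ===== LEMMAS AND PROOFS =====

lemma head?_dropWhile_not (p : String → Bool) (l : List String) (x : String)
    (hx : (l.dropWhile p).head? = some x) : p x = false := by
  induction l with
  | nil => simp at hx
  | cons y ys ih =>
    by_cases hy : p y = true
    · rw [List.dropWhile_cons_of_pos hy] at hx; exact ih hx
    · rw [List.dropWhile_cons_of_neg hy] at hx
      simp at hx
      subst hx
      simpa using hy

-- A's step on a valid element equal to the current streak type just increments the counter.
lemma run_fold (a : String) (hv : (a == "perro" || a == "gato") = true) :
    ∀ (ru : List String), (∀ x ∈ ru, x = a) → ∀ (j c p M PM : Int),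
      (PySem.List.enumerate ru j).foldl aStep (c, p, a, M, PM) =
        (c + ru.length, p, a, M, PM) := by
  intro ru
  induction ru with
  | nil => intro _ j c p M PM; simp [PySem.List.enumerate]
  | cons x rest ih =>
    intro h j c p M PM
    have hx : x = a := h x (by simp)
    have hrest : ∀ y ∈ rest, y = a := fun y hy => h y (by simp [hy])
    subst hx
    rw [PySem.List.enumerate_cons, List.foldl_cons]
    have hstep : aStep (c, p, x, M, PM) (j, x) = (c + 1, p, x, M, PM) := by
      simp [aStep, hv]
    rw [hstep, ih hrest]
    have : c + 1 + (rest.length : Int) = c + ((rest.length : Int) + 1) := by ring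
    simp [this]

-- Invariant: A's remaining loop + final flush equals B's run-skipping loop started
-- from the flushed best pair, whenever the next element cannot extend the current streak.
lemma main_lemma : ∀ (n : Nat) (l : List String), l.length ≤ n →
    ∀ (i c p m pm : Int) (t : String), 0 ≤ m →
      (∀ x, l.head? = some x → (x == "perro" || x == "gato") = true → x ≠ t) →
      aFinal ((PySem.List.enumerate l i).foldl aStep (c, p, t, m, pm)) =
        bLoop l i (if c > m then c else m) (if c > m then p else pm) := by
  intro n
  induction n with
  | zero =>
    intro l hl i c p m pm t _ _
    have : l = [] := List.length_eq_zero_iff.mp (Nat.le_zero.mp hl)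
    subst this
    simp [PySem.List.enumerate, bLoop, aFinal]
  | succ n ih =>
    intro l hl i c p m pm t hm hhead
    match l with
    | [] => simp [PySem.List.enumerate, bLoop, aFinal]
    | a :: rest =>
      have hrest : rest.length ≤ n := Nat.succ_le_succ_iff.mp hl
      rw [PySem.List.enumerate_cons, List.foldl_cons]
      set m' : Int := if c > m then c else m with hm'
      set pm' : Int := if c > m then p else pm with hpm'
      have hm'0 : 0 ≤ m' := by rw [hm']; split_ifs <;> omega
      by_cases hv : (a == "perro" || a == "gato") = true
      · -- valid token: a starts a new streak (a ≠ t by hhead)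
        have hat : a ≠ t := hhead a rfl hv
        have hne : (a != t) = true := by simpa [bne_iff_ne] using hat
        have hstep : aStep (c, p, t, m, pm) (i, a) = (1, i, a, m', pm') := by
          have h1 : aStep (c, p, t, m, pm) (i, a) =
              (if c > m then ((1 : Int), i, a, c, p) else (1, i, a, m, pm)) := by
            simp [aStep, hv, hne]
          rw [h1, hm', hpm']; split_ifs <;> rfl
        rw [hstep]
        -- split rest into the run of a's and the remainder
        set tw := rest.takeWhile (fun x => x == a) with htw
        set dw := rest.dropWhile (fun x => x == a) with hdw
        have htwa : ∀ x ∈ tw, x = a := by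
          intro x hx
          have := List.mem_takeWhile_imp hx
          simpa [eq_comm] using (beq_iff_eq.mp this)
        have henum : PySem.List.enumerate rest (i + 1) =
            PySem.List.enumerate tw (i + 1) ++
              PySem.List.enumerate dw (i + 1 + tw.length) := by
          conv_lhs => rw [show rest = tw ++ dw from (List.takeWhile_append_dropWhile).symm]
          rw [PySem.List.enumerate_append]
        rw [henum, List.foldl_append, run_fold a hv tw htwa]
        have hdwlen : dw.length ≤ n := le_trans (List.length_dropWhile_le _ _) hrest
        have hdwhead : ∀ x, dw.head? = some x → (x == "perro" || x == "gato") = true → x ≠ a := by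
          intro x hx _ hxa
          have hfalse := head?_dropWhile_not (fun z => z == a) rest x (hdw ▸ hx)
          rw [hxa] at hfalse
          simp at hfalse
        rw [ih dw hdwlen (i + 1 + tw.length) (1 + tw.length) i m' pm' a hm'0 hdwhead]
        -- now reduce B's side
        conv_rhs => rw [bLoop]
        simp only [hv, if_true, ← htw, ← hdw]
        have e1 : ((tw.length : Int) + 1) = 1 + (tw.length : Int) := by ring
        have e2 : i + (1 + (tw.length : Int)) = i + 1 + (tw.length : Int) := by ring
        rw [e1, e2]
        split_ifs <;> rfl
      · -- invalid token: flush and reset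
        have hstep : aStep (c, p, t, m, pm) (i, a) = (0, -1, "", m', pm') := by
          have h1 : aStep (c, p, t, m, pm) (i, a) =
              (if c > m then ((0 : Int), (-1 : Int), "", c, p) else (0, -1, "", m, pm)) := by
            simp [aStep, hv]
          rw [h1, hm', hpm']; split_ifs <;> rfl
        rw [hstep]
        have hresthead : ∀ x, rest.head? = some x → (x == "perro" || x == "gato") = true → x ≠ "" := by
          intro x _ hxv hxe
          subst hxe
          simp at hxv
        rw [ih rest hrest (i + 1) 0 (-1) m' pm' "" hm'0 hresthead]
        have h0 : ¬ ((0 : Int) > m') := by omega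
        rw [if_neg h0, if_neg h0]
        conv_rhs => rw [bLoop]
        simp [hv]

-- ===== VERDICT (by name: the statement is the Claim_ definition above) =====
theorem subsecuencia_mas_larga_spec : Claim_equal_subsecuencia_mas_larga := by
  intro l _
  show subsecuencia_mas_larga l = subsecuencia_mas_larga_alt l
  unfold subsecuencia_mas_larga subsecuencia_mas_larga_alt
  have h := main_lemma l.length l (le_refl _) 0 0 (-1) 0 0 ""
    (by omega)
    (by intro x _ hxv hxe; subst hxe; simp at hxv)
  simpa using h
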